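-- pv_equiv track=rewrite | github.com/clio-vega/proofs | transversality_analysis.py | satisfies_support_condition
-- ===== SOURCE A (Python) =====
-- def row_of(T, val):
--     for r, row in enumerate(T):
--         if val in row:
--             return r
--     return None
--
-- def satisfies_support_condition(T, k):
--     """Check row_T(2j) <= j-1 for all j=1,...,floor(k/2)."""
--     for j in range(1, k // 2 + 1):
--         val = 2 * j
--         r = row_of(T, val)
--         if r is None:
--             continue
--         if r > j - 1:
--             return False
--     return True
-- ===== SOURCE B (Python) =====
-- def satisfies_support_condition(T, k):
--     """Check row_T(2j) <= j-1 for all j=1,...,floor(k/2).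
--
--     Single row-major pass over the table: a cell x counts iff it is an even
--     target value in [2, 2*(k//2)] not yet seen in an earlier cell; the row
--     index of its first occurrence is checked against x//2 - 1 immediately.
--     """
--     m = k // 2
--     seen = set()
--     for r, row in enumerate(T):
--         for x in row:
--             if x % 2 == 0 and 2 <= x <= 2 * m and x not in seen:
--                 seen.add(x)
--                 if r > x // 2 - 1:
--                     return False
--     return True
-- ===== Notes on version B (the rewrite author's own statement) =====
-- stated objective: alternative
-- what changed: A loops over j=1..k//2 and rescans the whole table from the top for each j; B drops the j-loop entirely and makes one row-major pass over the table, checking each even target value in [2, 2*(k//2)] at its first occurrence (tracked by a seen set) against its row bound.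
import Mathlib
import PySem

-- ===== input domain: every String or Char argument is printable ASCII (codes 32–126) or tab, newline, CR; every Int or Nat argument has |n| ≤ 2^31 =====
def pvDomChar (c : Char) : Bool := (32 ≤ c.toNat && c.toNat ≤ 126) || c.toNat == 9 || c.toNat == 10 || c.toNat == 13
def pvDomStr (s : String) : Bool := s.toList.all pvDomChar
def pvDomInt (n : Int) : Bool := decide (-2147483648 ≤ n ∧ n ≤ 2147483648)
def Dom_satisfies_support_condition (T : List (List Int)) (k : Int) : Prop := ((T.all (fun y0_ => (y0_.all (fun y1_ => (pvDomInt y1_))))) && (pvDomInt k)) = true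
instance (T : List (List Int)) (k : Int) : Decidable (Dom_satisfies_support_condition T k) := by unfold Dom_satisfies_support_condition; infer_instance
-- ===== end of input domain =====

-- B replaces A's loop over j=1..k//2 (each rescanning the whole table) by one
-- row-major pass over the table with a seen set, checking each even target value
-- at its first occurrence; objective: alternative (the j-loop disappears).

-- ===== PORT A =====
-- helper row_of: first row index containing val, else None
def row_of_go (val : Int) : List (List Int) → Int → Option Int
  | [], _ => none
  | row :: rest, r => if row.contains val then some r else row_of_go val rest (r + 1)

def row_of (T : List (List Int)) (val : Int) : Option Int := row_of_go val T 0

def sscA_go (T : List (List Int)) : List Int → Bool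
  | [] => true
  | j :: js =>
    match row_of T (2 * j) with
    | none => sscA_go T js
    | some r => if r > j - 1 then false else sscA_go T js

def satisfies_support_condition (T : List (List Int)) (k : Int) : Bool :=
  sscA_go T (PySem.List.pyRange 1 (PySem.Int.floordiv k 2 + 1) 1)

-- ===== PORT B =====
-- targetB m x: x is an even value in [2, 2*m]
def targetB (m x : Int) : Bool := (PySem.Int.mod x 2 == 0) && (2 ≤ x) && (x ≤ 2 * m)

-- inner loop over one row's cells; none = early 'return False'
def sscB_row (m r : Int) : List Int → PySem.Set Int → Option (PySem.Set Int)
  | [], seen => some seen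
  | x :: xs, seen =>
    if targetB m x && !(PySem.Set.contains seen x) then
      if r > PySem.Int.floordiv x 2 - 1 then none
      else sscB_row m r xs (PySem.Set.add seen x)
    else sscB_row m r xs seen

-- outer loop over enumerate(T)
def sscB_rows (m : Int) : List (List Int) → Int → PySem.Set Int → Bool
  | [], _, _ => true
  | row :: rest, r, seen =>
    match sscB_row m r row seen with
    | none => false
    | some s => sscB_rows m rest (r + 1) s

def satisfies_support_condition_alt (T : List (List Int)) (k : Int) : Bool :=
  sscB_rows (PySem.Int.floordiv k 2) T 0 PySem.Set.empty

-- ===== PRECONDITION & SPEC =====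
def Spec_satisfies_support_condition (T : List (List Int)) (k : Int) (out : Bool) : Prop := out = satisfies_support_condition_alt T k
instance (T : List (List Int)) (k : Int) (out : Bool) : Decidable (Spec_satisfies_support_condition T k out) := by unfold Spec_satisfies_support_condition; infer_instance

-- ===== CLAIM (what is proved, stated in full; the proofs are below) =====
def Claim_equal_satisfies_support_condition : Prop := ∀ (T : List (List Int)) (k : Int), Dom_satisfies_support_condition T k → Spec_satisfies_support_condition T k (satisfies_support_condition T k)

-- ===== LEMMAS AND PROOFS =====

-- shared characterisation: every even target value's first row obeys the bound
def SuppOK (T : List (List Int)) (m : Int) : Prop :=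
  ∀ x i : Int, targetB m x = true → row_of T x = some i → i ≤ PySem.Int.floordiv x 2 - 1

theorem sscA_go_iff (T : List (List Int)) (js : List Int) :
    sscA_go T js = true ↔ ∀ j ∈ js, ∀ i, row_of T (2 * j) = some i → i ≤ j - 1 := by
  induction js with
  | nil => simp [sscA_go]
  | cons j js ih =>
    cases h : row_of T (2 * j) with
    | none =>
      simp only [sscA_go, h, ih, List.mem_cons]
      constructor
      · rintro hall y (rfl | hy) i hi
        · rw [h] at hi; cases hi
        · exact hall y hy i hi
      · intro hall y hy i hi; exact hall y (Or.inr hy) i hi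
    | some r =>
      simp only [sscA_go, h]
      by_cases hr : r > j - 1
      · rw [if_pos hr]
        constructor
        · intro hf; cases hf
        · intro hall
          have := hall j (List.mem_cons_self) r h
          omega
      · simp only [if_neg hr, ih, List.mem_cons]
        constructor
        · rintro hall y (rfl | hy) i hi
          · rw [h] at hi; injection hi with hi; omega
          · exact hall y hy i hi
        · intro hall y hy i hi; exact hall y (Or.inr hy) i hi

theorem A_iff (T : List (List Int)) (k : Int) :
    satisfies_support_condition T k = true ↔ SuppOK T (PySem.Int.floordiv k 2) := by
  set m := PySem.Int.floordiv k 2 with hm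
  rw [satisfies_support_condition, sscA_go_iff, SuppOK]
  constructor
  · intro hall x i htx hrow
    simp only [targetB, Bool.and_eq_true, beq_iff_eq, decide_eq_true_eq] at htx
    obtain ⟨⟨hmod, h2⟩, hle⟩ := htx
    rw [PySem.Int.mod_eq_emod_of_pos (by norm_num)] at hmod
    obtain ⟨j, rfl⟩ : ∃ j, x = 2 * j := ⟨x / 2, by omega⟩
    have hfd : PySem.Int.floordiv (2 * j) 2 = j := by
      rw [PySem.Int.floordiv_eq_ediv_of_pos (by norm_num)]; omega
    rw [hfd]
    exact hall j (by rw [PySem.List.mem_pyRange_one]; omega) i hrow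
  · intro hall j hj i hrow
    rw [PySem.List.mem_pyRange_one] at hj
    have hfd : PySem.Int.floordiv (2 * j) 2 = j := by
      rw [PySem.Int.floordiv_eq_ediv_of_pos (by norm_num)]; omega
    have htx : targetB m (2 * j) = true := by
      simp only [targetB, Bool.and_eq_true, beq_iff_eq, decide_eq_true_eq]
      refine ⟨⟨?_, by omega⟩, by omega⟩
      rw [PySem.Int.mod_eq_emod_of_pos (by norm_num)]; omega
    have := hall (2 * j) i htx hrow
    omega

theorem sscB_row_none_iff (m r : Int) (row : List Int) (seen : PySem.Set Int) :
    sscB_row m r row seen = none ↔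
      ∃ x ∈ row, targetB m x = true ∧ x ∉ seen ∧ ¬(r ≤ PySem.Int.floordiv x 2 - 1) := by
  induction row generalizing seen with
  | nil => simp [sscB_row]
  | cons x xs ih =>
    simp only [sscB_row]
    by_cases hc : (targetB m x && !(PySem.Set.contains seen x)) = true
    · obtain ⟨htx, hns⟩ : targetB m x = true ∧ x ∉ seen := by simpa using hc
      rw [if_pos hc]
      by_cases hr : r > PySem.Int.floordiv x 2 - 1
      · rw [if_pos hr]
        exact iff_of_true rfl ⟨x, List.mem_cons_self, htx, hns, by omega⟩
      · rw [if_neg hr, ih]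
        constructor
        · rintro ⟨y, hy, hty, hys, hyf⟩
          exact ⟨y, List.mem_cons_of_mem _ hy, hty,
            fun h => hys ((PySem.Set.mem_add _ _ _).mpr (Or.inl h)), hyf⟩
        · rintro ⟨y, hyc, hty, hys, hyf⟩
          rcases List.mem_cons.mp hyc with rfl | hy
          · omega
          · refine ⟨y, hy, hty, fun h => ?_, hyf⟩
            rcases (PySem.Set.mem_add _ _ _).mp h with h' | rfl
            · exact hys h'
            · omega
    · rw [if_neg hc, ih]
      constructor
      · rintro ⟨y, hy, hty, hys, hyf⟩
        exact ⟨y, List.mem_cons_of_mem _ hy, hty, hys, hyf⟩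
      · rintro ⟨y, hyc, hty, hys, hyf⟩
        rcases List.mem_cons.mp hyc with rfl | hy
        · exact absurd (by simp [hty, hys]) hc
        · exact ⟨y, hy, hty, hys, hyf⟩

theorem sscB_row_some_mem (m r : Int) (row : List Int) (seen s : PySem.Set Int)
    (h : sscB_row m r row seen = some s) :
    ∀ y, y ∈ s ↔ y ∈ seen ∨ (targetB m y = true ∧ y ∈ row) := by
  induction row generalizing seen with
  | nil => simp only [sscB_row, Option.some.injEq] at h; subst h; simp
  | cons x xs ih =>
    intro y
    simp only [sscB_row] at h
    by_cases hc : (targetB m x && !(PySem.Set.contains seen x)) = true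
    · obtain ⟨htx, -⟩ : targetB m x = true ∧ x ∉ seen := by simpa using hc
      rw [if_pos hc] at h
      by_cases hr : r > PySem.Int.floordiv x 2 - 1
      · rw [if_pos hr] at h; cases h
      · rw [if_neg hr] at h
        rw [ih _ h y, PySem.Set.mem_add]
        constructor
        · rintro ((hy | rfl) | ⟨hty, hyxs⟩)
          · exact Or.inl hy
          · exact Or.inr ⟨htx, List.mem_cons_self⟩
          · exact Or.inr ⟨hty, List.mem_cons_of_mem _ hyxs⟩
        · rintro (hy | ⟨hty, hyc⟩)
          · exact Or.inl (Or.inl hy)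
          · rcases List.mem_cons.mp hyc with rfl | hyxs
            · exact Or.inl (Or.inr rfl)
            · exact Or.inr ⟨hty, hyxs⟩
    · rw [if_neg hc] at h
      rw [ih _ h y]
      constructor
      · rintro (hy | ⟨hty, hyxs⟩)
        · exact Or.inl hy
        · exact Or.inr ⟨hty, List.mem_cons_of_mem _ hyxs⟩
      · rintro (hy | ⟨hty, hyc⟩)
        · exact Or.inl hy
        · rcases List.mem_cons.mp hyc with rfl | hyxs
          · refine Or.inl ?_
            by_contra hns
            exact absurd (by simp [hty, hns]) hc
          · exact Or.inr ⟨hty, hyxs⟩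

theorem sscB_rows_iff (m : Int) (rest : List (List Int)) (r : Int) (seen : PySem.Set Int) :
    sscB_rows m rest r seen = true ↔
      ∀ x, targetB m x = true → x ∉ seen →
        ∀ i, row_of_go x rest r = some i → i ≤ PySem.Int.floordiv x 2 - 1 := by
  induction rest generalizing r seen with
  | nil => simp [sscB_rows, row_of_go]
  | cons row rest ih =>
    simp only [sscB_rows]
    cases h : sscB_row m r row seen with
    | none =>
      obtain ⟨x, hx, htx, hns, hfail⟩ := (sscB_row_none_iff m r row seen).mp h
      simp only [Bool.false_eq_true, false_iff, not_forall]
      refine ⟨x, htx, hns, r, ?_, by omega⟩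
      simp [row_of_go, List.contains_eq_mem, hx]
    | some s =>
      have hmem := sscB_row_some_mem m r row seen s h
      have hok : ∀ x ∈ row, targetB m x = true → x ∉ seen → r ≤ PySem.Int.floordiv x 2 - 1 := by
        intro x hx htx hns
        by_contra hf
        have : sscB_row m r row seen = none :=
          (sscB_row_none_iff m r row seen).mpr ⟨x, hx, htx, hns, hf⟩
        rw [this] at h; cases h
      rw [ih]
      constructor
      · intro hall x htx hns i hrow
        simp only [row_of_go] at hrow
        by_cases hin : row.contains x = true
        · rw [if_pos hin] at hrow
          injection hrow with hrow
          subst hrow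
          exact hok x (by simpa [List.contains_eq_mem] using hin) htx hns
        · rw [if_neg hin] at hrow
          have hnr : x ∉ row := by simpa [List.contains_eq_mem] using hin
          have hxs : x ∉ s := fun hxin => by
            rcases (hmem x).mp hxin with h' | ⟨_, h'⟩
            · exact hns h'
            · exact hnr h'
          exact hall x htx hxs i hrow
      · intro hall x htx hxs i hrow
        have hns : x ∉ seen := fun h' => hxs ((hmem x).mpr (Or.inl h'))
        have hnr : x ∉ row := fun h' => hxs ((hmem x).mpr (Or.inr ⟨htx, h'⟩))
        have : row_of_go x (row :: rest) r = some i := by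
          simp only [row_of_go]
          rw [if_neg (by simpa [List.contains_eq_mem] using hnr)]
          exact hrow
        exact hall x htx hns i this

theorem B_iff (T : List (List Int)) (k : Int) :
    satisfies_support_condition_alt T k = true ↔ SuppOK T (PySem.Int.floordiv k 2) := by
  rw [satisfies_support_condition_alt, sscB_rows_iff, SuppOK]
  constructor
  · intro hall x i htx hrow
    exact hall x htx (by simp [PySem.Set.empty]) i hrow
  · intro hall x htx _ i hrow
    exact hall x i htx hrow

-- ===== VERDICT (by name: the statement is the Claim_ definition above) =====
theorem satisfies_support_condition_spec : Claim_equal_satisfies_support_condition := by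
  intro T k _
  unfold Spec_satisfies_support_condition
  rw [Bool.eq_iff_iff]
  exact (A_iff T k).trans (B_iff T k).symm
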